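-- pv_equiv track=rewrite | github.com/lukro/rolling-horizon-algorithm-for-dynamic-darp | misc/parser.py | process_dot_code
-- ===== SOURCE A (Python) =====
-- def count_passengers(node):
--     # Count the number of passengers, ignoring whether they are entering or leaving
--     return sum(1 for part in node.split(',') if part.strip() not in ['0', ''])
--
-- def process_dot_code(dot_code):
--     clusters = {}  # Dictionary to hold nodes for each cluster
--     edges = []  # List to hold edges
--
--     for line in dot_code.split('\n'):
--         line = line.strip()
--         if '->' in line:  # It's an edge
--             edges.append(line)
--         elif '"' in line:  # It's a node
--             node = line.strip('"')
--             num_passengers = count_passengers(node)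
--             clusters.setdefault(num_passengers, []).append(node)
--
--     # Construct the final DOT code with reordered clusters
--     processed_lines = ['digraph G {']
--     for num_passengers in sorted(clusters.keys()):
--         processed_lines.append(f'    subgraph cluster_{num_passengers} {{')
--         processed_lines.append('        peripheries=0;')
--         for node in clusters[num_passengers]:
--             processed_lines.append(f'        "{node}";')
--         processed_lines.append('    }')
--     # Add edges
--     for edge in edges:
--         processed_lines.append(f'    {edge}')
--     processed_lines.append('}')
--
--     return '\n'.join(processed_lines)
-- ===== SOURCE B (Python) =====
-- def count_passengers(node):
--     # Count the number of passengers, ignoring whether they are entering or leaving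
--     return sum(1 for part in node.split(',') if part.strip() not in ['0', ''])
--
-- def process_dot_code(dot_code):
--     # One classification pass, then filter passes per distinct count (no dict).
--     lines = [line.strip() for line in dot_code.split('\n')]
--     edges = [l for l in lines if '->' in l]
--     nodes = [l.strip('"') for l in lines if '->' not in l and '"' in l]
--     counts = [count_passengers(n) for n in nodes]
--     out = ['digraph G {']
--     for k in sorted(set(counts)):
--         out.append(f'    subgraph cluster_{k} {{')
--         out.append('        peripheries=0;')
--         out += [f'        "{n}";' for n, c in zip(nodes, counts) if c == k]
--         out.append('    }')
--     out += [f'    {e}' for e in edges]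
--     out.append('}')
--     return '\n'.join(out)
-- ===== Notes on version B (the rewrite author's own statement) =====
-- stated objective: idiomatic
-- what changed: B replaces A's single stateful loop building a dict of clusters by comprehension-style classification passes (strip all lines, filter edges, filter+unquote nodes, map counts) and emits each cluster by filtering the node/count pairs for each distinct sorted count, with no dict at all.
import Mathlib
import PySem

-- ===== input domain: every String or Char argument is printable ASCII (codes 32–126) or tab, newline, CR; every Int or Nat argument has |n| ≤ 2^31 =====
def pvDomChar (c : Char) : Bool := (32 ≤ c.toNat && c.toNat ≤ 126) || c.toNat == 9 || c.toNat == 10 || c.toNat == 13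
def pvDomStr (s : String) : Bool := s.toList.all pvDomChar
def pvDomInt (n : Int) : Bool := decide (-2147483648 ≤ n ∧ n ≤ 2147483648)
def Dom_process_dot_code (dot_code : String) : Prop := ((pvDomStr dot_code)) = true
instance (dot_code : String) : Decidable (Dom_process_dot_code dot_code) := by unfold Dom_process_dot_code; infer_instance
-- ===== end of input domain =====

-- B reorders the work: comprehension-style classification passes and per-count filters instead of A's stateful dict-building loop (objective: idiomatic).

-- shared helper (identical line of Python in both programs): count_passengers
def count_passengers (node : String) : Int :=
  ((PySem.Str.split? node ",").getD []).foldl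
    (fun acc part =>
      if ¬ (PySem.Str.strip part = "0" ∨ PySem.Str.strip part = "") then acc + 1 else acc) 0

-- ===== PORT A =====
def process_dot_code (dot_code : String) : String :=
  let st :=
    ((PySem.Str.split? dot_code "\n").getD []).foldl
      (fun (st : PySem.Dict Int (List String) × List String) line =>
        let line := PySem.Str.strip line
        if PySem.Str.isIn "->" line then
          (st.1, st.2 ++ [line])
        else if PySem.Str.isIn "\"" line then
          let node := PySem.Str.stripChars line "\""
          let num_passengers := count_passengers node
          (st.1.modify num_passengers [] (· ++ [node]), st.2)
        else st)
      ((PySem.Dict.empty : PySem.Dict Int (List String)), ([] : List String))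
  let clusters := st.1
  let edges := st.2
  let processed_lines := ["digraph G {"]
  let processed_lines :=
    (PySem.List.sorted clusters.keys (fun x => x) false).foldl
      (fun acc num_passengers =>
        let acc := acc ++ ["    subgraph cluster_" ++ PySem.Int.toStr num_passengers ++ " {"]
        let acc := acc ++ ["        peripheries=0;"]
        let acc := (clusters.getD num_passengers []).foldl
          (fun acc node => acc ++ ["        \"" ++ node ++ "\";"]) acc
        acc ++ ["    }"])
      processed_lines
  let processed_lines := edges.foldl (fun acc edge => acc ++ ["    " ++ edge]) processed_lines
  let processed_lines := processed_lines ++ ["}"]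
  PySem.Str.join "\n" processed_lines

-- ===== PORT B =====
def process_dot_code_alt (dot_code : String) : String :=
  let lines := ((PySem.Str.split? dot_code "\n").getD []).map PySem.Str.strip
  let edges := lines.filter (fun l => PySem.Str.isIn "->" l)
  let nodes := (lines.filter (fun l => ¬ PySem.Str.isIn "->" l ∧ PySem.Str.isIn "\"" l)).map
    (fun l => PySem.Str.stripChars l "\"")
  let counts := nodes.map count_passengers
  let out := ["digraph G {"]
  let out :=
    (PySem.List.sorted (PySem.Set.ofList counts) (fun x => x) false).foldl
      (fun out k =>
        let out := out ++ ["    subgraph cluster_" ++ PySem.Int.toStr k ++ " {"]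
        let out := out ++ ["        peripheries=0;"]
        let out := out ++ ((nodes.zip counts).filter (fun p => p.2 == k)).map
          (fun p => "        \"" ++ p.1 ++ "\";")
        out ++ ["    }"])
      out
  let out := out ++ edges.map (fun e => "    " ++ e)
  let out := out ++ ["}"]
  PySem.Str.join "\n" out

-- ===== PRECONDITION & SPEC =====
def Spec_process_dot_code (dot_code : String) (out : String) : Prop := out = process_dot_code_alt dot_code
instance (dot_code : String) (out : String) : Decidable (Spec_process_dot_code dot_code out) := by unfold Spec_process_dot_code; infer_instance

-- ===== CLAIM (what is proved, stated in full; the proofs are below) =====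
def Claim_equal_process_dot_code : Prop := ∀ (dot_code : String), Dom_process_dot_code dot_code → Spec_process_dot_code dot_code (process_dot_code dot_code)

-- ===== LEMMAS AND PROOFS =====

lemma pv_loopA (ls : List String) (d : PySem.Dict Int (List String)) (es : List String) :
    ls.foldl
      (fun (st : PySem.Dict Int (List String) × List String) line =>
        let line := PySem.Str.strip line
        if PySem.Str.isIn "->" line then
          (st.1, st.2 ++ [line])
        else if PySem.Str.isIn "\"" line then
          let node := PySem.Str.stripChars line "\""
          let num_passengers := count_passengers node
          (st.1.modify num_passengers [] (· ++ [node]), st.2)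
        else st) (d, es)
    =
    ( (((ls.map PySem.Str.strip).filter
          (fun l => ¬ PySem.Str.isIn "->" l ∧ PySem.Str.isIn "\"" l)).map
          (fun l => PySem.Str.stripChars l "\"")).foldl
        (fun d n => d.modify (count_passengers n) [] (· ++ [n])) d,
      es ++ (ls.map PySem.Str.strip).filter (fun l => PySem.Str.isIn "->" l) ) := by
  induction ls generalizing d es with
  | nil => simp
  | cons x xs ih =>
    simp only [List.foldl_cons, List.map_cons, List.filter_cons]
    by_cases h1 : PySem.Str.isIn "->" (PySem.Str.strip x) = true
    · simp only [h1, if_true, not_true, false_and, decide_false,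
        Bool.false_eq_true, if_false, ih, List.append_assoc, List.singleton_append]
    · by_cases h2 : PySem.Str.isIn "\"" (PySem.Str.strip x) = true
      · simp only [h1, h2, Bool.false_eq_true, if_false, eq_self_iff_true, if_true,
          not_false_iff, true_and, decide_true, ih, List.map_cons, List.foldl_cons]
      · simp only [h1, h2, Bool.false_eq_true, if_false, not_false_iff, true_and,
          decide_false, ih]

lemma pv_zip {α β : Type} (l : List α) (f : α → β) :
    l.zip (l.map f) = l.map (fun a => (a, f a)) := by
  induction l with
  | nil => rfl
  | cons a t ih => simp [ih]

theorem pv_main : ∀ s, process_dot_code s = process_dot_code_alt s := by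
  intro s
  unfold process_dot_code process_dot_code_alt
  rw [pv_loopA]
  simp only []
  rw [← List.foldl_map (f := fun n => ((count_passengers n : Int), n))
        (g := fun (d : PySem.Dict Int (List String)) (p : Int × String) => d.modify p.1 [] (· ++ [p.2]))]
  simp only [List.nil_append]
  generalize hN : (List.map (fun l => PySem.Str.stripChars l "\"")
      (List.filter (fun l => decide (¬PySem.Str.isIn "->" l = true ∧ PySem.Str.isIn "\"" l = true))
        (List.map PySem.Str.strip ((PySem.Str.split? s "\n").getD [])))) = N
  generalize hE : (List.filter (fun l => PySem.Str.isIn "->" l)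
      (List.map PySem.Str.strip ((PySem.Str.split? s "\n").getD []))) = E
  have hkeys : (List.foldl (fun d p => d.modify p.1 [] fun x => x ++ [p.2]) PySem.Dict.empty
      (N.map fun n => (count_passengers n, n))).keys = PySem.Set.ofList (N.map count_passengers) := by
    rw [PySem.Dict.keys_foldl_modify_key (key := Prod.fst) (f := fun _ p => (· ++ [p.2]))]
    simp [PySem.Set.update, PySem.Set.ofList_eq_foldl, List.map_map, Function.comp_def]
  have hget : ∀ k : Int, (List.foldl (fun d p => d.modify p.1 [] fun x => x ++ [p.2]) PySem.Dict.empty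
      (N.map fun n => (count_passengers n, n))).getD k [] = N.filter (fun n => count_passengers n == k) := by
    intro k
    rw [PySem.Dict.getD_foldl_modify_append]
    simp [List.filter_map, List.map_map, Function.comp_def]
  rw [hkeys, pv_zip, PySem.List.foldl_append_singleton_eq_map (f := fun edge => "    " ++ edge)]
  have houter :
      List.foldl (fun acc num_passengers =>
        List.foldl (fun acc node => acc ++ ["        \"" ++ node ++ "\";"])
            (acc ++ ["    subgraph cluster_" ++ PySem.Int.toStr num_passengers ++ " {"] ++
              ["        peripheries=0;"])
            ((List.foldl (fun d p => d.modify p.1 [] fun x => x ++ [p.2]) PySem.Dict.empty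
                (N.map fun n => (count_passengers n, n))).getD num_passengers []) ++ ["    }"])
        ["digraph G {"]
        (PySem.List.sorted (PySem.Set.ofList (N.map count_passengers)) (fun x => x) false)
      =
      List.foldl (fun out k =>
        out ++ ["    subgraph cluster_" ++ PySem.Int.toStr k ++ " {"] ++ ["        peripheries=0;"] ++
          List.map (fun p => "        \"" ++ p.1 ++ "\";")
            (List.filter (fun p => p.2 == k) (N.map fun n => (n, count_passengers n))) ++ ["    }"])
        ["digraph G {"]
        (PySem.List.sorted (PySem.Set.ofList (N.map count_passengers)) (fun x => x) false) := by
    apply PySem.List.foldl_congr_mem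
    intro acc k hk
    rw [hget k, PySem.List.foldl_append_singleton_eq_map]
    simp [List.filter_map, List.map_map, Function.comp_def, List.append_assoc]
  rw [houter]

-- ===== VERDICT (by name: the statement is the Claim_ definition above) =====
theorem process_dot_code_spec : Claim_equal_process_dot_code := by
  intro s _
  unfold Spec_process_dot_code
  exact pv_main s
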